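-- pv_equiv track=rewrite | github.com/vkushnir/python_apt | apt.py | get_packages_stream
-- ===== SOURCE A (Python) =====
-- def get_packages_stream(s):
--     """Return a generator that yields packages from a stream."""
--     package = {}
--     previous_key = None
--     for line in s.splitlines():
--         if line == '':
--             yield package
--             package = {}
--             previous_key = None
--         elif line.startswith(' '):
--             package[previous_key] += line.strip()
--         else:
--             key, value = line.split(':', 1)
--             package[key.strip()] = value.strip()
--             previous_key = key
--     yield package
-- ===== SOURCE B (Python) =====
-- def get_packages_stream(s):
--     """Two-stage parse: split lines into blank-separated records, then turn each
--     record into (raw key, value-parts) chunks and build the dict from the chunks."""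
--     records, cur = [], []
--     for line in s.splitlines():
--         if line == '':
--             records.append(cur)
--             cur = []
--         else:
--             cur.append(line)
--     records.append(cur)
--     for rec in records:
--         chunks = []
--         for line in rec:
--             if line.startswith(' '):
--                 chunks[-1][1].append(line.strip())
--             else:
--                 key, value = line.split(':', 1)
--                 chunks.append((key, [value]))
--         pkg = {}
--         for key, parts in chunks:
--             pkg[key.strip()] = parts[0].strip() + ''.join(parts[1:])
--         yield pkg
-- ===== Notes on version B (the rewrite author's own statement) =====
-- stated objective: alternative
-- what changed: B is staged: it splits the lines into blank-separated records, groups each record's lines into (key, value-parts) chunks so continuation lines attach to their chunk instead of mutating the dict, and only then builds each dict in one pass over the chunks; A is a single stateful pass doing dict lookups and in-place += for continuations.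
import Mathlib
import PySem

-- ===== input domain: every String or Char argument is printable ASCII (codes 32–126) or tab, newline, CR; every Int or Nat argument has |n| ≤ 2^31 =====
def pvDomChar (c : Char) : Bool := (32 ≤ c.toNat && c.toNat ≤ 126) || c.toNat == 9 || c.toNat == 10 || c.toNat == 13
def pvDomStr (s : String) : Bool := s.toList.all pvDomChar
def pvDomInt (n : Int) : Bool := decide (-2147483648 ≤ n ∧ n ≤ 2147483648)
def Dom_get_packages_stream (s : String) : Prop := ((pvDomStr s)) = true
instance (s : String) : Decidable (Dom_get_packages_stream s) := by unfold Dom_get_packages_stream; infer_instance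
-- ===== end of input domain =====

-- B is a staged re-decomposition (records → chunks → dict) of A's single stateful pass; the
-- equivalence is about the list of yielded dicts (A is a generator; neither mutates its argument).

-- ===== PORT A =====
-- one pass: state = (current package, previous raw key, packages yielded so far);
-- where Python raises (KeyError / ValueError) the state is left unchanged — Pre_ excludes those inputs
def pvStepA (st : PySem.Dict String String × Option String × List (PySem.Dict String String))
    (line : String) : PySem.Dict String String × Option String × List (PySem.Dict String String) :=
  if line = "" then
    (PySem.Dict.empty, none, st.2.2 ++ [st.1])
  else if PySem.Str.startswith line " " then
    match st.2.1 with
    | some k =>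
      match st.1.get? k with
      | some v => (st.1.insert k (v ++ PySem.Str.strip line), st.2.1, st.2.2)
      | none => st          -- Python: KeyError (outside Pre_)
    | none => st            -- Python: KeyError(None) (outside Pre_)
  else
    match PySem.Str.splitMax? line ":" 1 with
    | some [key, value] =>
      (st.1.insert (PySem.Str.strip key) (PySem.Str.strip value), some key, st.2.2)
    | _ => st               -- Python: ValueError, no colon in line (outside Pre_)

def get_packages_stream (s : String) : List (List (String × String)) :=
  let fin := (PySem.Str.splitlines s).foldl pvStepA (PySem.Dict.empty, none, [])
  (fin.2.2 ++ [fin.1]).map (fun d => d.items)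

-- ===== PORT B =====
-- Source B stage 1: split the lines into blank-separated records (records, cur accumulator)
def pvSplitRecords (ls : List String) : List (List String) :=
  let fin := ls.foldl
    (fun (st : List (List String) × List String) line =>
      if line = "" then (st.1 ++ [st.2], []) else (st.1, st.2 ++ [line]))
    ([], [])
  fin.1 ++ [fin.2]

-- Source B stage 2: group a record's lines into (raw key, value-parts) chunks
def pvChunkLine (chunks : List (String × List String)) (line : String) :
    List (String × List String) :=
  if PySem.Str.startswith line " " then
    match chunks.getLast? with
    | some c => chunks.dropLast ++ [(c.1, c.2 ++ [PySem.Str.strip line])]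
    | none => chunks        -- Python: IndexError on chunks[-1] (outside Pre_)
  else
    match PySem.Str.splitMax? line ":" 1 with
    | some [key, value] => chunks ++ [(key, [value])]
    | _ => chunks           -- Python: ValueError (outside Pre_)

-- Source B stage 3: build the dict from the chunks
def pvBuildPkg (chunks : List (String × List String)) : PySem.Dict String String :=
  chunks.foldl
    (fun pkg c => pkg.insert (PySem.Str.strip c.1)
      (PySem.Str.strip (c.2.headD "") ++ PySem.Str.join "" (c.2.drop 1)))
    PySem.Dict.empty

def get_packages_stream_alt (s : String) : List (List (String × String)) :=
  (pvSplitRecords (PySem.Str.splitlines s)).map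
    (fun rec => (pvBuildPkg (rec.foldl pvChunkLine [])).items)

-- ===== PRECONDITION & SPEC =====
-- line.split(':', 1) when it yields exactly (key, value); none when the colon is missing
def pvSplit1 (l : String) : Option (String × String) :=
  match PySem.Str.splitMax? l ":" 1 with
  | some [k, v] => some (k, v)
  | _ => none

-- a line may be followed by a continuation line: it is itself a continuation, or a key line
-- whose raw key is already stripped (A looks the UNSTRIPPED key up, so otherwise: KeyError)
def pvMayPrecedeCont (a : String) : Bool :=
  PySem.Str.startswith a " " ||
    ((pvSplit1 a).isSome &&
      (PySem.Str.strip ((pvSplit1 a).getD ("", "")).1 == ((pvSplit1 a).getD ("", "")).1))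

def pvAdjOK (a b : String) : Bool :=
  !PySem.Str.startswith b " " || (!(a == "") && pvMayPrecedeCont a)

def pvChainOK : List String → Bool
  | [] => true
  | [_] => true
  | a :: b :: t => pvAdjOK a b && pvChainOK (b :: t)

-- Pre_ = exactly the inputs on which Python A returns (raises nothing): every key line has a
-- colon (else ValueError), the first line is not a continuation (else KeyError(None)), and every
-- continuation line follows a non-blank line that may precede it (else KeyError).
def Pre_get_packages_stream (s : String) : Prop :=
  (∀ l ∈ PySem.Str.splitlines s,
      l = "" ∨ PySem.Str.startswith l " " = true ∨ (pvSplit1 l).isSome = true) ∧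
  (∀ b ∈ (PySem.Str.splitlines s).head?, PySem.Str.startswith b " " = false) ∧
  pvChainOK (PySem.Str.splitlines s) = true

instance (s : String) : Decidable (Pre_get_packages_stream s) := by
  unfold Pre_get_packages_stream; infer_instance

def pvWitness_get_packages_stream : String := "a: 1\n b\n\nx:2"

def Spec_get_packages_stream (s : String) (out : List (List (String × String))) : Prop := out = get_packages_stream_alt s
instance (s : String) (out : List (List (String × String))) : Decidable (Spec_get_packages_stream s out) := by unfold Spec_get_packages_stream; infer_instance

-- ===== CLAIM (what is proved, stated in full; the proofs are below) =====
def Claim_equal_get_packages_stream : Prop := ∀ (s : String), Dom_get_packages_stream s → Pre_get_packages_stream s → Spec_get_packages_stream s (get_packages_stream s)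

-- ===== LEMMAS AND PROOFS =====

-- cons-style record splitter used by the proofs: (first record, remaining records)
def pvRecs : List String → List String × List (List String)
  | [] => ([], [])
  | l :: t =>
    let p := pvRecs t
    if l = "" then ([], p.1 :: p.2) else (l :: p.1, p.2)

-- A's per-line action on (package, previous key) for a NON-BLANK line
def pvLineB (st : PySem.Dict String String × Option String) (line : String) :
    PySem.Dict String String × Option String :=
  if PySem.Str.startswith line " " then
    match st.2 with
    | some k =>
      match st.1.get? k with
      | some v => (st.1.insert k (v ++ PySem.Str.strip line), st.2)
      | none => st
    | none => st
  else
    match PySem.Str.splitMax? line ":" 1 with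
    | some [key, value] =>
      (st.1.insert (PySem.Str.strip key) (PySem.Str.strip value), some key)
    | _ => st

def pvRun (st : PySem.Dict String String × Option String) (rec : List String) :
    PySem.Dict String String :=
  (rec.foldl pvLineB st).1

theorem pvStepA_nonblank (pkg : PySem.Dict String String) (prev : Option String)
    (acc : List (PySem.Dict String String)) (l : String) (h : ¬ l = "") :
    pvStepA (pkg, prev, acc) l = ((pvLineB (pkg, prev) l).1, (pvLineB (pkg, prev) l).2, acc) := by
  simp only [pvStepA, pvLineB, if_neg h]
  cases hsw : PySem.Str.startswith l " " <;> simp only [Bool.false_eq_true, if_pos]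
  · cases PySem.Str.splitMax? l ":" 1 with
    | none => rfl
    | some xs =>
      cases xs with
      | nil => rfl
      | cons a t => cases t with
        | nil => rfl
        | cons b t2 => cases t2 with
          | nil => rfl
          | cons c t3 => rfl
  · cases prev with
    | none => rfl
    | some k => cases hg : pkg.get? k <;> simp [hg]

theorem pvFoldA (ls : List String) (pkg : PySem.Dict String String) (prev : Option String)
    (acc : List (PySem.Dict String String)) :
    (ls.foldl pvStepA (pkg, prev, acc)).2.2 ++ [(ls.foldl pvStepA (pkg, prev, acc)).1] =
    acc ++ pvRun (pkg, prev) (pvRecs ls).1 ::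
      (pvRecs ls).2.map (pvRun (PySem.Dict.empty, none)) := by
  induction ls generalizing pkg prev acc with
  | nil => simp [pvRecs, pvRun]
  | cons l t ih =>
    by_cases h : l = ""
    · subst h
      simp only [List.foldl_cons, pvStepA]
      rw [if_pos trivial, ih]
      simp [pvRecs, pvRun]
    · simp only [List.foldl_cons, pvStepA_nonblank pkg prev acc l h]
      rw [ih]
      simp only [pvRecs, if_neg h]
      rfl

theorem pvFoldRecB (ls : List String) (done : List (List String)) (cur : List String) :
    (ls.foldl
      (fun (st : List (List String) × List String) line =>
        if line = "" then (st.1 ++ [st.2], []) else (st.1, st.2 ++ [line]))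
      (done, cur)).1 ++
    [(ls.foldl
      (fun (st : List (List String) × List String) line =>
        if line = "" then (st.1 ++ [st.2], []) else (st.1, st.2 ++ [line]))
      (done, cur)).2] =
    done ++ (cur ++ (pvRecs ls).1) :: (pvRecs ls).2 := by
  induction ls generalizing done cur with
  | nil => simp [pvRecs]
  | cons l t ih =>
    by_cases h : l = ""
    · subst h
      rw [List.foldl_cons, if_pos rfl, ih (done ++ [cur]) []]
      simp [pvRecs]
    · rw [List.foldl_cons, if_neg h, ih done (cur ++ [l])]
      simp [pvRecs, if_neg h]

theorem pvSplitRecords_eq (ls : List String) :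
    pvSplitRecords ls = (pvRecs ls).1 :: (pvRecs ls).2 := by
  have h := pvFoldRecB ls [] []
  simpa [pvSplitRecords] using h

theorem joinNil_cons (x : String) (xs : List String) :
    PySem.Str.join "" (x :: xs) = x ++ PySem.Str.join "" xs := by
  apply String.toList_inj.mp
  cases xs with
  | nil => simp [PySem.Str.toList_join, PySem.Chars.join_singleton, PySem.Chars.join_nil]
  | cons b t => simp [PySem.Str.toList_join, PySem.Chars.join_cons_cons]

theorem joinNil_append (xs : List String) (x : String) :
    PySem.Str.join "" (xs ++ [x]) = PySem.Str.join "" xs ++ x := by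
  induction xs with
  | nil =>
    rw [List.nil_append, joinNil_cons,
      show PySem.Str.join "" ([] : List String) = "" from rfl, String.append_empty]
    rfl
  | cons a t ih =>
    rw [List.cons_append, joinNil_cons, joinNil_cons, ih, String.append_assoc]


theorem pvBuildPkg_concat (cs : List (String × List String)) (c : String × List String) :
    pvBuildPkg (cs ++ [c]) = (pvBuildPkg cs).insert (PySem.Str.strip c.1)
      (PySem.Str.strip (c.2.headD "") ++ PySem.Str.join "" (c.2.drop 1)) := by
  simp [pvBuildPkg, List.foldl_append]

-- the invariant linking A's running state to B's chunk list for the current record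
def pvInv (st : PySem.Dict String String × Option String)
    (cs : List (String × List String)) : Prop :=
  st.1 = pvBuildPkg cs ∧
  ((st.2 = none ∧ cs = []) ∨
   ∃ k p ps cs', st.2 = some k ∧ cs = cs' ++ [(k, p :: ps)])

theorem pvChainOK_cons (a b : String) (t : List String)
    (h : pvChainOK (a :: b :: t) = true) :
    pvAdjOK a b = true ∧ pvChainOK (b :: t) = true := by
  simpa [pvChainOK] using h

theorem pvChainOK_tail (a : String) (t : List String)
    (h : pvChainOK (a :: t) = true) : pvChainOK t = true := by
  cases t with
  | nil => rfl
  | cons b t' => exact (pvChainOK_cons a b t' h).2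

theorem pvMain (ls : List String) (st : PySem.Dict String String × Option String)
    (cs : List (String × List String))
    (hok : ∀ l ∈ ls, l = "" ∨ PySem.Str.startswith l " " = true ∨ (pvSplit1 l).isSome = true)
    (hch : pvChainOK ls = true)
    (hinv : pvInv st cs)
    (hhd : ∀ b ∈ ls.head?, PySem.Str.startswith b " " = true →
      ∃ k, st.2 = some k ∧ PySem.Str.strip k = k) :
    pvRun st (pvRecs ls).1 :: ((pvRecs ls).2.map (pvRun (PySem.Dict.empty, none))) =
    pvBuildPkg ((pvRecs ls).1.foldl pvChunkLine cs) ::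
      ((pvRecs ls).2.map (fun r => pvBuildPkg (r.foldl pvChunkLine []))) := by
  induction ls generalizing st cs with
  | nil => simp [pvRecs, pvRun, hinv.1]
  | cons l t ih =>
    have hchT : pvChainOK t = true := pvChainOK_tail l t hch
    have hokT : ∀ x ∈ t, x = "" ∨ PySem.Str.startswith x " " = true ∨ (pvSplit1 x).isSome = true :=
      fun x hx => hok x (List.mem_cons_of_mem _ hx)
    by_cases hb : l = ""
    · subst hb
      have hrec := ih (PySem.Dict.empty, none) [] hokT hchT ⟨rfl, Or.inl ⟨rfl, rfl⟩⟩
        (by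
          intro c hc hswc
          exfalso
          cases t with
          | nil => simp at hc
          | cons c' t' =>
            have hcc : c' = c := by simpa using hc
            subst hcc
            have hadj := (pvChainOK_cons _ _ _ hch).1
            simp [pvAdjOK] at hadj
            simp [hadj] at hswc)
      simp only [pvRecs]
      exact congrArg₂ List.cons (by simp [pvRun, hinv.1]) hrec
    · cases hsw : PySem.Str.startswith l " " with
      | true =>
        obtain ⟨k0, hk2, hkstr0⟩ := hhd l rfl hsw
        obtain ⟨hpkg, hrest⟩ := hinv
        rcases hrest with ⟨hnone, -⟩ | ⟨k, p, ps, cs', hsome, hcs⟩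
        · rw [hnone] at hk2; simp at hk2
        · have hkk : k = k0 := Option.some.inj (hsome.symm.trans hk2)
          subst hkk
          have hkstr : PySem.Str.strip k = k := hkstr0
          have hv : st.1.get? k = some (PySem.Str.strip p ++ PySem.Str.join "" ps) := by
            rw [hpkg, hcs, pvBuildPkg_concat, hkstr]
            simp [PySem.Dict.get?_insert_self]
          have hline : pvLineB st l =
              (st.1.insert k ((PySem.Str.strip p ++ PySem.Str.join "" ps) ++ PySem.Str.strip l),
               some k) := by
            simp only [pvLineB, if_pos hsw, hk2, hv]
          have hchunk : pvChunkLine cs l = cs' ++ [(k, p :: (ps ++ [PySem.Str.strip l]))] := by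
            simp only [pvChunkLine, if_pos hsw, hcs, List.getLast?_concat, List.dropLast_concat,
              List.append_assoc, List.cons_append, List.nil_append]
          have hinv' : pvInv (pvLineB st l) (pvChunkLine cs l) := by
            rw [hline, hchunk]
            refine ⟨?_, Or.inr ⟨k, p, ps ++ [PySem.Str.strip l], cs', rfl, rfl⟩⟩
            show st.1.insert k _ = _
            rw [hpkg, hcs, pvBuildPkg_concat, pvBuildPkg_concat, hkstr,
              PySem.Dict.insert_insert_self]
            congr 1
            show _ = PySem.Str.strip p ++ PySem.Str.join "" (ps ++ [PySem.Str.strip l])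
            rw [joinNil_append, String.append_assoc]
          have hhd' : ∀ c ∈ t.head?, PySem.Str.startswith c " " = true →
              ∃ k0, (pvLineB st l).2 = some k0 ∧ PySem.Str.strip k0 = k0 := by
            intro c _ _
            exact ⟨k, by rw [hline], hkstr⟩
          simp only [pvRecs, if_neg hb, pvRun, List.foldl_cons]
          exact ih (pvLineB st l) (pvChunkLine cs l) hokT hchT hinv' hhd'
      | false =>
        have hcol : (pvSplit1 l).isSome = true := by
          rcases hok l (by simp) with h | h | h
          · exact absurd h hb
          · rw [h] at hsw; exact Bool.noConfusion hsw
          · exact h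
        obtain ⟨key, value, hsp⟩ : ∃ key value,
            PySem.Str.splitMax? l ":" 1 = some [key, value] := by
          unfold pvSplit1 at hcol
          cases hs : PySem.Str.splitMax? l ":" 1 with
          | none => rw [hs] at hcol; exact Bool.noConfusion hcol
          | some xs =>
            cases xs with
            | nil => rw [hs] at hcol; exact Bool.noConfusion hcol
            | cons a t1 => cases t1 with
              | nil => rw [hs] at hcol; exact Bool.noConfusion hcol
              | cons b t2 => cases t2 with
                | nil => exact ⟨a, b, rfl⟩
                | cons c t3 => rw [hs] at hcol; exact Bool.noConfusion hcol
        have hline : pvLineB st l =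
            (st.1.insert (PySem.Str.strip key) (PySem.Str.strip value), some key) := by
          simp only [pvLineB, if_neg (show ¬PySem.Str.startswith l " " = true by rw [hsw]; simp), hsp]
        have hchunk : pvChunkLine cs l = cs ++ [(key, [value])] := by
          simp only [pvChunkLine, if_neg (show ¬PySem.Str.startswith l " " = true by rw [hsw]; simp), hsp]
        have hinv' : pvInv (pvLineB st l) (pvChunkLine cs l) := by
          rw [hline, hchunk]
          refine ⟨?_, Or.inr ⟨key, value, [], cs, rfl, rfl⟩⟩
          simp only [hinv.1, pvBuildPkg_concat, List.headD_cons, List.drop_succ_cons,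
            List.drop_nil, show PySem.Str.join "" ([] : List String) = "" from rfl,
            String.append_empty]
        have hhd' : ∀ c ∈ t.head?, PySem.Str.startswith c " " = true →
            ∃ k0, (pvLineB st l).2 = some k0 ∧ PySem.Str.strip k0 = k0 := by
          intro c hc hswc
          cases t with
          | nil => simp at hc
          | cons c' t' =>
            have hcc : c' = c := by simpa using hc
            subst hcc
            have hadj := (pvChainOK_cons _ _ _ hch).1
            have hmay : pvMayPrecedeCont l = true := by
              simp only [pvAdjOK, Bool.or_eq_true, Bool.not_eq_true',
                Bool.and_eq_true] at hadj
              rcases hadj with h | h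
              · simp at h; simp [h] at hswc
              · exact h.2
            have hsp1 : pvSplit1 l = some (key, value) := by unfold pvSplit1; rw [hsp]
            have hkeq : PySem.Str.strip key = key := by
              simp only [pvMayPrecedeCont, hsp1, Bool.or_eq_true, Bool.and_eq_true,
                beq_iff_eq, Option.isSome_some, Option.getD_some] at hmay
              rcases hmay with h | h
              · rw [h] at hsw; exact Bool.noConfusion hsw
              · exact h.2
            exact ⟨key, by rw [hline], hkeq⟩
        simp only [pvRecs, if_neg hb, pvRun, List.foldl_cons]
        exact ih (pvLineB st l) (pvChunkLine cs l) hokT hchT hinv' hhd'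

-- ===== VERDICT (by name: the statement is the Claim_ definition above) =====
theorem get_packages_stream_spec : Claim_equal_get_packages_stream := by
  intro s _ hpre
  obtain ⟨h1, h2, h3⟩ := hpre
  unfold Spec_get_packages_stream get_packages_stream get_packages_stream_alt
  rw [pvSplitRecords_eq]
  simp only []
  rw [pvFoldA]
  have hmain := pvMain (PySem.Str.splitlines s) (PySem.Dict.empty, none) [] h1 h3
    ⟨rfl, Or.inl ⟨rfl, rfl⟩⟩
    (by
      intro b hb hsw
      exact Bool.noConfusion (hsw.symm.trans (h2 b hb)))
  rw [List.nil_append, hmain]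
  simp
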